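-- pv_equiv track=rewrite | github.com/mfkiwl/cgra_pnr | sa.py | __is_cell_legal
-- ===== SOURCE A (Python) =====
-- def __is_cell_legal(pos, check_bound=True):
--     # This is only valid for my custom VPR board. You should
--     # always use the cell legal function generated from the
--     # architecture file
--     x, y = pos
--     if x in [2 + j * 8 for j in range(7)] \
--             or x in [6 + j * 8 for j in range(7)]:
--         return False
--     if check_bound:
--         if x < 1 or x > 59 - 1 or y < 1 or y > 59 - 1:
--             return False
--     return True
-- ===== SOURCE B (Python) =====
-- def _is_special_column(x):
--     # Recursive descent: strip one 8-wide tile at a time until the base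
--     # columns 2 and 6 are reached (or we leave the banded region 10..54).
--     if x == 2 or x == 6:
--         return True
--     if 10 <= x <= 54:
--         return _is_special_column(x - 8)
--     return False
--
--
-- def __is_cell_legal(pos, check_bound=True):
--     x, y = pos
--     if _is_special_column(x):
--         return False
--     if check_bound:
--         if x < 1 or x > 58 or y < 1 or y > 58:
--             return False
--     return True
-- ===== Notes on version B (the rewrite author's own statement) =====
-- stated objective: alternative
-- what changed: Replaced the two built-and-scanned comprehension lists with a recursive descent that peels one 8-wide tile off x at a time (inside the band 10..54) until it reaches the base illegal columns 2 and 6.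
import Mathlib
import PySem

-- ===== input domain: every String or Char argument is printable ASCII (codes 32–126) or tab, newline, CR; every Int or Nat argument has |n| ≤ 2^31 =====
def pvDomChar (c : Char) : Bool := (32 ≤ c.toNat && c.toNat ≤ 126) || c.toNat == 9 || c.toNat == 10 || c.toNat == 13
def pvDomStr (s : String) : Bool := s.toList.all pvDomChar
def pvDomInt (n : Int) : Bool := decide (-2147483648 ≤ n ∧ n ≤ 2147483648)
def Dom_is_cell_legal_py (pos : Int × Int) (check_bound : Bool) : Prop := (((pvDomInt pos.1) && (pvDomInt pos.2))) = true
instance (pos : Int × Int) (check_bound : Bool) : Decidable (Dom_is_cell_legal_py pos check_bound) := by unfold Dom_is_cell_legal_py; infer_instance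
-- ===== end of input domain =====

-- ===== PORT A =====
-- literal transliteration of A: build the two comprehension lists and test membership
def is_cell_legal_py (pos : Int × Int) (check_bound : Bool) : Bool :=
  let x := pos.1
  let y := pos.2
  if ((PySem.List.pyRange 0 7 1).map (fun j => 2 + j * 8)).contains x
      || ((PySem.List.pyRange 0 7 1).map (fun j => 6 + j * 8)).contains x then
    false
  else if check_bound then
    if x < 1 || x > 59 - 1 || y < 1 || y > 59 - 1 then false else true
  else true

-- ===== PORT B =====
-- B: recursive descent, peeling one 8-wide tile off x per step (no lists built)
def pvSpecialCol (x : Int) : Bool :=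
  if x == 2 || x == 6 then true
  else if 10 ≤ x ∧ x ≤ 54 then pvSpecialCol (x - 8)
  else false
termination_by x.toNat
decreasing_by omega

def is_cell_legal_py_alt (pos : Int × Int) (check_bound : Bool) : Bool :=
  let x := pos.1
  let y := pos.2
  if pvSpecialCol x then
    false
  else if check_bound then
    if x < 1 || x > 58 || y < 1 || y > 58 then false else true
  else true

-- ===== PRECONDITION & SPEC =====
def Spec_is_cell_legal_py (pos : Int × Int) (check_bound : Bool) (out : Bool) : Prop := out = is_cell_legal_py_alt pos check_bound
instance (pos : Int × Int) (check_bound : Bool) (out : Bool) : Decidable (Spec_is_cell_legal_py pos check_bound out) := by unfold Spec_is_cell_legal_py; infer_instance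

-- ===== CLAIM (what is proved, stated in full; the proofs are below) =====
def Claim_equal_is_cell_legal_py : Prop := ∀ (pos : Int × Int) (check_bound : Bool), Dom_is_cell_legal_py pos check_bound → Spec_is_cell_legal_py pos check_bound (is_cell_legal_py pos check_bound)

-- ===== LEMMAS AND PROOFS =====
theorem pvSpecialCol_iff (x : Int) : pvSpecialCol x = true ↔
    (x = 2 ∨ x = 10 ∨ x = 18 ∨ x = 26 ∨ x = 34 ∨ x = 42 ∨ x = 50 ∨
     x = 6 ∨ x = 14 ∨ x = 22 ∨ x = 30 ∨ x = 38 ∨ x = 46 ∨ x = 54) := by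
  fun_induction pvSpecialCol x with
  | case1 x h => simp only [Bool.or_eq_true, beq_iff_eq] at h; simp; omega
  | case2 x h h2 ih => rw [ih]; simp only [Bool.or_eq_true, beq_iff_eq] at h; omega
  | case3 x h h2 => simp only [Bool.or_eq_true, beq_iff_eq] at h; simp; omega

-- ===== VERDICT (by name: the statement is the Claim_ definition above) =====
theorem is_cell_legal_py_spec : Claim_equal_is_cell_legal_py := by
  intro pos cb _
  unfold Spec_is_cell_legal_py is_cell_legal_py is_cell_legal_py_alt
  have hr : PySem.List.pyRange 0 7 1 = [0, 1, 2, 3, 4, 5, 6] := by decide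
  simp only [hr, List.map, List.contains_cons, List.contains_nil]
  congr 1
  rw [Bool.eq_iff_iff, pvSpecialCol_iff]
  simp only [Bool.or_eq_true, beq_iff_eq, Bool.false_eq_true, or_false, iff_true]
  rw [eq_iff_iff]
  omega
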